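-- pv_equiv track=rewrite | github.com/jonasphilipp/InfOCF | inference/preocf.py | ranks2tpo
-- ===== SOURCE A (Python) =====
-- def ranks2tpo(ranks: dict[str, None | int]) -> list[set[str]]:
--     # Group worlds by their rank
--     rank_groups: dict[int, set[str]] = {}
--     for world, rank in ranks.items():
--         if rank is not None:
--             if rank not in rank_groups:
--                 rank_groups[rank] = set()
--             rank_groups[rank].add(world)
--
--     # Sort groups by rank and return as list of lists
--     return [rank_groups[rank] for rank in sorted(rank_groups.keys())]
-- ===== SOURCE B (Python) =====
-- def ranks2tpo(ranks: dict[str, None | int]) -> list[set[str]]: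
--     # Sort all (world, rank) records by rank, then sweep once over the sorted
--     # records, cutting a new group at every index where the rank changes.
--     pairs = sorted(((w, r) for w, r in ranks.items() if r is not None),
--                    key=lambda p: p[1])
--     groups = []
--     i = 0
--     n = len(pairs)
--     while i < n:
--         j = i
--         while j < n and pairs[j][1] == pairs[i][1]:
--             j += 1
--         groups.append({w for w, _ in pairs[i:j]})
--         i = j
--     return groups
-- ===== Notes on version B (the rewrite author's own statement) =====
-- stated objective: alternative
-- what changed: A buckets worlds into a dict of sets keyed by rank and then sorts the keys; B sorts the (world, rank) records once and sweeps them linearly, cutting a group at each rank boundary (no dict, no per-rank buckets).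
import Mathlib
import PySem

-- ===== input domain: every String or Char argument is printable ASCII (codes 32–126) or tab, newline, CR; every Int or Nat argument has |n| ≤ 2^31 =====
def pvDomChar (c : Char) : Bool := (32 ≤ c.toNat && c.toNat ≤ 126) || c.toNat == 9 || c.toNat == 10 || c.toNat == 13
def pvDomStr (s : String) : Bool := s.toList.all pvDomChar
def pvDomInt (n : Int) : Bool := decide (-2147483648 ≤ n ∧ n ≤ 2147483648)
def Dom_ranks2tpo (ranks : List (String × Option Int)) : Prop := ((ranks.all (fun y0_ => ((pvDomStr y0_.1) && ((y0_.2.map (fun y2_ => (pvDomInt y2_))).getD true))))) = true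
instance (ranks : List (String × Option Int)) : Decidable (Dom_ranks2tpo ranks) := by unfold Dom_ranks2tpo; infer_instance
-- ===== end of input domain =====

-- B replaces A's bucket-dict-then-sort-keys strategy by sorting the (world, rank)
-- records once and sweeping them linearly, cutting a group at each rank change (objective: alternative).

-- ===== PORT A =====
-- The dict parameter is received as its insertion-ordered association list; PySem.Dict.ofList
-- rebuilds the Python dict.  'rank_groups[rank]' in the comprehension is read with getD:
-- the key is always present there (it was inserted in the loop).
def ranks2tpo (ranks : List (String × Option Int)) : List (List String) :=
  let rank_groups : PySem.Dict Int (PySem.Set String) :=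
    (PySem.Dict.ofList ranks).items.foldl (fun d wr =>
      match wr.2 with
      | none => d
      | some rank =>
        let d' := if d.contains rank then d else d.insert rank PySem.Set.empty
        d'.modify rank PySem.Set.empty (fun s => PySem.Set.add s wr.1)) PySem.Dict.empty
  (PySem.List.sorted rank_groups.keys (fun k => k)).map
    (fun rank => rank_groups.getD rank PySem.Set.empty)

-- ===== PORT B =====
-- inner while loop: the run of records sharing the head's rank (takeWhile); the outer loop
-- resumes at the first record with a different rank (dropWhile); each group is the set
-- comprehension over the run's worlds.
def pvGroupRuns : List (String × Int) → List (List String)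
  | [] => []
  | (w, r) :: rest =>
    PySem.Set.ofList (w :: (rest.takeWhile (fun p => p.2 == r)).map (·.1))
      :: pvGroupRuns (rest.dropWhile (fun p => p.2 == r))
termination_by l => l.length
decreasing_by simpa using Nat.lt_succ_of_le (List.length_dropWhile_le _ _)

def ranks2tpo_alt (ranks : List (String × Option Int)) : List (List String) :=
  let pairs :=
    (PySem.Dict.ofList ranks).items.filterMap (fun wr => wr.2.map (fun r => (wr.1, r)))
  pvGroupRuns (PySem.List.sorted pairs (fun p => p.2))

-- ===== PRECONDITION & SPEC =====
def Spec_ranks2tpo (ranks : List (String × Option Int)) (out : List (List String)) : Prop := out = ranks2tpo_alt ranks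
instance (ranks : List (String × Option Int)) (out : List (List String)) : Decidable (Spec_ranks2tpo ranks out) := by unfold Spec_ranks2tpo; infer_instance

-- ===== CLAIM (what is proved, stated in full; the proofs are below) =====
def Claim_equal_ranks2tpo : Prop := ∀ (ranks : List (String × Option Int)), Dom_ranks2tpo ranks → Spec_ranks2tpo ranks (ranks2tpo ranks)

-- ===== LEMMAS AND PROOFS =====

-- ---- A side: the dict-building loop ----

-- one loop step of A, with the contains-test/insert/modify collapsed into a single insert
def pvStep (d : PySem.Dict Int (PySem.Set String)) (p : String × Int) :
    PySem.Dict Int (PySem.Set String) :=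
  d.insert p.2 (PySem.Set.add (d.getD p.2 PySem.Set.empty) p.1)

theorem pvGetD_of_not_contains (d : PySem.Dict Int (PySem.Set String)) (k : Int)
    (h : d.contains k = false) : d.getD k PySem.Set.empty = PySem.Set.empty := by
  have := (PySem.Dict.get?_eq_none_iff_contains d k).mpr h
  simp [PySem.Dict.getD, this]

theorem pvStepA_eq (d : PySem.Dict Int (PySem.Set String)) (p : String × Int) :
    ((if d.contains p.2 then d else d.insert p.2 PySem.Set.empty).modify p.2 PySem.Set.empty
      (fun s => PySem.Set.add s p.1)) = pvStep d p := by
  by_cases h : d.contains p.2 = true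
  · simp [h, PySem.Dict.modify, pvStep]
  · rw [if_neg h, PySem.Dict.modify, PySem.Dict.getD_insert_self, PySem.Dict.insert_insert_self,
      pvStep, pvGetD_of_not_contains d p.2 (by simpa using h)]

theorem pvFoldA_eq (xs : List (String × Option Int)) :
    ∀ d, xs.foldl (fun d wr =>
      match wr.2 with
      | none => d
      | some rank =>
        let d' := if d.contains rank then d else d.insert rank PySem.Set.empty
        d'.modify rank PySem.Set.empty (fun s => PySem.Set.add s wr.1)) d
    = (xs.filterMap (fun wr => wr.2.map (fun r => (wr.1, r)))).foldl pvStep d := by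
  induction xs with
  | nil => intro d; rfl
  | cons x xs ih =>
    intro d
    match hx : x.2 with
    | none =>
      simp only [List.foldl_cons, List.filterMap_cons, hx]
      exact ih d
    | some r =>
      simp only [List.foldl_cons, List.filterMap_cons, hx, Option.map_some]
      rw [ih]
      congr 1
      exact pvStepA_eq d (x.1, r)

theorem pvKeys_nodup_fold (ps : List (String × Int)) :
    ∀ d : PySem.Dict Int (PySem.Set String), d.keys.Nodup → (ps.foldl pvStep d).keys.Nodup := by
  induction ps with
  | nil => intro d h; exact h
  | cons p ps ih =>
    intro d h
    exact ih _ (PySem.Dict.nodup_keys_insert d p.2 _ h)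

theorem pvMem_keys_fold (ps : List (String × Int)) (r : Int) :
    ∀ d : PySem.Dict Int (PySem.Set String),
      (r ∈ (ps.foldl pvStep d).keys ↔ r ∈ d.keys ∨ r ∈ ps.map (·.2)) := by
  induction ps with
  | nil => intro d; simp
  | cons p ps ih =>
    intro d
    rw [List.foldl_cons, ih]
    rw [pvStep, PySem.Dict.mem_keys_insert]
    simp
    tauto

theorem pvGetD_fold (ps : List (String × Int)) (r : Int) :
    ∀ d : PySem.Dict Int (PySem.Set String),
      (ps.foldl pvStep d).getD r PySem.Set.empty
        = ((ps.filter (fun p => p.2 == r)).map (·.1)).foldl PySem.Set.add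
            (d.getD r PySem.Set.empty) := by
  induction ps with
  | nil => intro d; rfl
  | cons p ps ih =>
    intro d
    rw [List.foldl_cons, ih]
    by_cases h : p.2 = r
    · subst h
      rw [List.filter_cons_of_pos (by simp), List.map_cons, List.foldl_cons]
      congr 1
      rw [pvStep, PySem.Dict.getD_insert_self]
    · rw [List.filter_cons_of_neg (by simpa using h)]
      congr 1
      rw [pvStep, PySem.Dict.getD_insert_of_ne _ _ _ (Ne.symm h)]

-- ---- B side: the sorted sweep ----

-- the run heads (one rank per emitted group), mirroring pvGroupRuns
def pvRunKeys : List (String × Int) → List Int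
  | [] => []
  | (_, r) :: rest => r :: pvRunKeys (rest.dropWhile (fun p => p.2 == r))
termination_by l => l.length
decreasing_by simpa using Nat.lt_succ_of_le (List.length_dropWhile_le _ _)

theorem pvRunKeys_subset : ∀ (S : List (String × Int)) (r' : Int),
    r' ∈ pvRunKeys S → r' ∈ S.map (·.2) := by
  intro S
  induction S using pvRunKeys.induct with
  | case1 => simp [pvRunKeys]
  | case2 w r rest ih =>
    intro r' hr'
    rw [pvRunKeys] at hr'
    rcases List.mem_cons.mp hr' with h | h
    · simp [h]
    · have := ih _ h
      rcases List.mem_map.mp this with ⟨p, hp, hpe⟩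
      exact List.mem_map.mpr ⟨p, by
        exact List.mem_cons_of_mem _ ((List.dropWhile_sublist _).subset hp), hpe⟩

theorem pvRunKeys_mem : ∀ (S : List (String × Int)) (r' : Int),
    (r' ∈ pvRunKeys S ↔ r' ∈ S.map (·.2)) := by
  intro S
  induction S using pvRunKeys.induct with
  | case1 => simp [pvRunKeys]
  | case2 w r rest ih =>
    intro r'
    constructor
    · exact pvRunKeys_subset _ _
    · intro h
      rw [pvRunKeys]
      rcases List.mem_map.mp h with ⟨p, hp, hpe⟩
      rcases List.mem_cons.mp hp with h1 | h1
      · have hr2 : r' = r := by rw [h1] at hpe; exact hpe.symm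
        rw [hr2]; exact List.mem_cons_self
      · by_cases hr : r' = r
        · simp [hr]
        · right
          apply (ih r').mpr
          apply List.mem_map.mpr
          refine ⟨p, ?_, hpe⟩
          -- p is in rest but not in the takeWhile run (its key is r' ≠ r), so it is in the dropWhile
          have hsplit := List.takeWhile_append_dropWhile (p := fun p : String × Int => p.2 == r) (l := rest)
          rcases (List.mem_append.mp (by rw [hsplit]; exact h1)) with h2 | h2
          · exfalso
            have := List.mem_takeWhile_imp h2
            rw [hpe] at this
            exact hr (by simpa using this)
          · exact h2

theorem pvDrop_key_ne (rest : List (String × Int)) (r : Int)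
    (hs : rest.Pairwise (fun a b => a.2 ≤ b.2)) (hlo : ∀ p ∈ rest, r ≤ p.2) :
    ∀ p ∈ rest.dropWhile (fun p => p.2 == r), p.2 ≠ r := by
  induction rest with
  | nil => simp
  | cons q qs ih =>
    by_cases hq : (q.2 == r) = true
    · rw [List.dropWhile_cons, if_pos hq]
      have hqr : q.2 = r := by simpa using hq
      refine ih ((List.pairwise_cons.mp hs).2) (fun p hp => ?_)
      rw [← hqr]; exact (List.pairwise_cons.mp hs).1 p hp
    · rw [List.dropWhile_cons, if_neg hq]
      intro p hp
      have hqr : q.2 ≠ r := by simpa using hq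
      have hrlt : r < q.2 := lt_of_le_of_ne (hlo q List.mem_cons_self) (Ne.symm hqr)
      rcases List.mem_cons.mp hp with h1 | h1
      · rw [h1]; exact hqr
      · have := (List.pairwise_cons.mp hs).1 p h1
        exact ne_of_gt (lt_of_lt_of_le hrlt this)

theorem pvRunKeys_pairwise_lt : ∀ (S : List (String × Int)),
    S.Pairwise (fun a b => a.2 ≤ b.2) → (pvRunKeys S).Pairwise (· < ·) := by
  intro S
  induction S using pvRunKeys.induct with
  | case1 => simp [pvRunKeys]
  | case2 w r rest ih =>
    intro hs
    rw [pvRunKeys]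
    have htl : (rest.dropWhile (fun p => p.2 == r)).Pairwise (fun a b => a.2 ≤ b.2) :=
      List.Pairwise.sublist (List.dropWhile_sublist _) (List.pairwise_cons.mp hs).2
    refine List.pairwise_cons.mpr ⟨?_, ih htl⟩
    intro r' hr'
    rcases List.mem_map.mp (pvRunKeys_subset _ _ hr') with ⟨p, hp, hpe⟩
    have hle : r ≤ p.2 :=
      (List.pairwise_cons.mp hs).1 p ((List.dropWhile_sublist _).subset hp)
    have hne : p.2 ≠ r :=
      pvDrop_key_ne rest r ((List.pairwise_cons.mp hs).2)
        (fun q hq => (List.pairwise_cons.mp hs).1 q hq) p hp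
    rw [← hpe]
    exact lt_of_le_of_ne hle (Ne.symm hne)

theorem pvFilter_drop (rest : List (String × Int)) (r r' : Int) (hne : r' ≠ r) :
    (rest.dropWhile (fun p => p.2 == r)).filter (fun p => p.2 == r')
      = rest.filter (fun p => p.2 == r') := by
  have htw : (rest.takeWhile (fun p => p.2 == r)).filter (fun p => p.2 == r') = [] :=
    List.filter_eq_nil_iff.mpr (fun p hp => by
      have := List.mem_takeWhile_imp (p := fun p : String × Int => p.2 == r) hp
      simp only [beq_iff_eq] at this ⊢
      rw [this]; exact fun h => hne h.symm)
  conv_rhs => rw [← List.takeWhile_append_dropWhile (p := fun p : String × Int => p.2 == r) (l := rest)]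
  rw [List.filter_append, htw, List.nil_append]

theorem pvGroupRuns_eq : ∀ (S : List (String × Int)),
    S.Pairwise (fun a b => a.2 ≤ b.2) →
    pvGroupRuns S = (pvRunKeys S).map
      (fun r => PySem.Set.ofList ((S.filter (fun p => p.2 == r)).map (·.1))) := by
  intro S
  induction S using pvRunKeys.induct with
  | case1 => simp [pvRunKeys, pvGroupRuns]
  | case2 w r rest ih =>
    intro hs
    have htl : (rest.dropWhile (fun p => p.2 == r)).Pairwise (fun a b => a.2 ≤ b.2) :=
      List.Pairwise.sublist (List.dropWhile_sublist _) (List.pairwise_cons.mp hs).2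
    rw [pvGroupRuns, pvRunKeys, List.map_cons, ih htl]
    congr 1
    · -- head group: the filter of (w,r)::rest at r is w followed by the takeWhile run
      congr 1
      have hrest : rest.filter (fun p => p.2 == r) = rest.takeWhile (fun p => p.2 == r) := by
        conv_lhs => rw [← List.takeWhile_append_dropWhile (p := fun p : String × Int => p.2 == r) (l := rest)]
        rw [List.filter_append]
        rw [List.filter_eq_self.mpr (fun p hp => List.mem_takeWhile_imp (p := fun p : String × Int => p.2 == r) hp)]
        rw [List.filter_eq_nil_iff.mpr (fun p hp => by
          simpa using pvDrop_key_ne rest r ((List.pairwise_cons.mp hs).2)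
            (fun q hq => (List.pairwise_cons.mp hs).1 q hq) p hp), List.append_nil]
      simp [hrest]
    · -- tail groups: no record with a tail rank lives in the head run
      apply List.map_congr_left
      intro r' hr'
      have hne : r' ≠ r := by
        rcases List.mem_map.mp (pvRunKeys_subset _ _ hr') with ⟨p, hp, hpe⟩
        rw [← hpe]
        exact pvDrop_key_ne rest r ((List.pairwise_cons.mp hs).2)
          (fun q hq => (List.pairwise_cons.mp hs).1 q hq) p hp
      congr 1
      rw [List.filter_cons, if_neg (by simp; exact fun h => hne h.symm), pvFilter_drop rest r r' hne]

-- ---- stability of the sort: per-rank filters are unchanged ----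

theorem pvInsertBy_pairwise (x : String × Int) : ∀ (ys : List (String × Int)),
    ys.Pairwise (fun a b => a.2 ≤ b.2) →
    (PySem.List.insertBy (fun a b => decide (a.2 < b.2)) x ys).Pairwise (fun a b => a.2 ≤ b.2) := by
  intro ys
  induction ys with
  | nil => intro _; simp [PySem.List.insertBy]
  | cons y t ih =>
    intro hs
    rw [PySem.List.insertBy]
    by_cases hlt : x.2 < y.2
    · rw [if_pos (by simpa using hlt)]
      refine List.pairwise_cons.mpr ⟨?_, hs⟩
      intro b hb
      rcases List.mem_cons.mp hb with h | h
      · rw [h]; exact le_of_lt hlt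
      · exact le_trans (le_of_lt hlt) ((List.pairwise_cons.mp hs).1 b h)
    · rw [if_neg (by simpa using hlt)]
      refine List.pairwise_cons.mpr ⟨?_, ih ((List.pairwise_cons.mp hs).2)⟩
      intro b hb
      rcases (PySem.List.mem_insertBy _ _ _ _).mp hb with h | h
      · rw [h]; exact le_of_not_gt hlt
      · exact (List.pairwise_cons.mp hs).1 b h

theorem pvFilter_insertBy (x : String × Int) (r : Int) : ∀ (ys : List (String × Int)),
    ys.Pairwise (fun a b => a.2 ≤ b.2) →
    (PySem.List.insertBy (fun a b => decide (a.2 < b.2)) x ys).filter (fun p => p.2 == r)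
      = if x.2 == r then ys.filter (fun p => p.2 == r) ++ [x]
        else ys.filter (fun p => p.2 == r) := by
  intro ys
  induction ys with
  | nil =>
    intro _
    by_cases h : (x.2 == r) = true <;> simp [PySem.List.insertBy, List.filter, h]
  | cons y t ih =>
    intro hs
    rw [PySem.List.insertBy]
    by_cases hlt : x.2 < y.2
    · rw [if_pos (by simpa using hlt)]
      by_cases hx : (x.2 == r) = true
      · -- every key in y::t exceeds r = x.2, so its filter is empty
        have hxr : x.2 = r := by simpa using hx
        have hnil : (y :: t).filter (fun p => p.2 == r) = [] := by
          apply List.filter_eq_nil_iff.mpr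
          intro p hp
          have : y.2 ≤ p.2 := by
            rcases List.mem_cons.mp hp with h | h
            · rw [h]
            · exact (List.pairwise_cons.mp hs).1 p h
          have : r < p.2 := lt_of_lt_of_le (hxr ▸ hlt) this
          simpa using ne_of_gt this
        rw [List.filter_cons, if_pos hx, hnil, hx]
        simp
      · have hx' : (x.2 == r) = false := by simpa using hx
        rw [List.filter_cons, if_neg (by simp [hx']), hx']
        simp
    · rw [if_neg (by simpa using hlt)]
      have ihe := ih ((List.pairwise_cons.mp hs).2)
      by_cases hy : (y.2 == r) = true
      · rw [List.filter_cons, if_pos hy, ihe, List.filter_cons, if_pos hy]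
        by_cases hx : (x.2 == r) = true <;> simp [hx]
      · have hy' : (y.2 == r) = false := by simpa using hy
        rw [List.filter_cons, if_neg (by simp [hy']), ihe]
        by_cases hx : (x.2 == r) = true <;> simp [hx, hy']

theorem pvFilter_foldl_insertBy (r : Int) : ∀ (ps acc : List (String × Int)),
    acc.Pairwise (fun a b => a.2 ≤ b.2) →
    (ps.foldl (fun acc x => PySem.List.insertBy (fun a b => decide (a.2 < b.2)) x acc) acc).filter
        (fun p => p.2 == r)
      = acc.filter (fun p => p.2 == r) ++ ps.filter (fun p => p.2 == r) := by
  intro ps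
  induction ps with
  | nil => intro acc _; simp
  | cons x t ih =>
    intro acc hs
    rw [List.foldl_cons, ih _ (pvInsertBy_pairwise x acc hs), pvFilter_insertBy x r acc hs]
    by_cases hx : (x.2 == r) = true
    · rw [if_pos hx, List.filter_cons, if_pos hx]; simp
    · rw [if_neg (by simpa using hx), List.filter_cons, if_neg (by simpa using hx)]

theorem pvFilter_sorted (ps : List (String × Int)) (r : Int) :
    (PySem.List.sorted ps (fun p => p.2)).filter (fun p => p.2 == r)
      = ps.filter (fun p => p.2 == r) := by
  rw [PySem.List.sorted_eq_foldl_insertBy, pvFilter_foldl_insertBy r ps [] (by simp)]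
  simp

-- ---- assembling both sides ----

theorem pvMain (ranks : List (String × Option Int)) : ranks2tpo ranks = ranks2tpo_alt ranks := by
  have hempty : ∀ r : Int, (PySem.Dict.empty : PySem.Dict Int (PySem.Set String)).getD r PySem.Set.empty = PySem.Set.empty := by
    intro r; rfl
  have hkeysempty : (PySem.Dict.empty : PySem.Dict Int (PySem.Set String)).keys = [] := rfl
  set xs := (PySem.Dict.ofList ranks).items with hxs
  set ps := xs.filterMap (fun wr => wr.2.map (fun r => (wr.1, r))) with hps
  set S := PySem.List.sorted ps (fun p => p.2) with hS
  have hSp : S.Pairwise (fun a b => a.2 ≤ b.2) := PySem.List.sorted_pairwise ps (fun p => p.2)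
  set d := ps.foldl pvStep PySem.Dict.empty with hd
  -- A's dict loop is the fold of pvStep over ps
  have hA : ranks2tpo ranks
      = (PySem.List.sorted d.keys (fun k => k)).map (fun r => d.getD r PySem.Set.empty) := by
    rw [ranks2tpo, pvFoldA_eq]
  -- A's sorted key list is exactly B's run-key list
  have hRlt : (pvRunKeys S).Pairwise (· < ·) := pvRunKeys_pairwise_lt S hSp
  have hnd : d.keys.Nodup :=
    pvKeys_nodup_fold ps PySem.Dict.empty (by rw [hkeysempty]; exact List.nodup_nil)
  have hperm : (pvRunKeys S).Perm d.keys := by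
    refine (List.perm_ext_iff_of_nodup (hRlt.imp ne_of_lt) hnd).mpr ?_
    intro r
    rw [pvRunKeys_mem, hd, pvMem_keys_fold, hkeysempty]
    have hmm : (S.map (·.2)).Perm (ps.map (·.2)) := (PySem.List.sorted_perm ps (fun p => p.2) false).map _
    simp [hmm.mem_iff]
  have hkeys : PySem.List.sorted d.keys (fun k => k) = pvRunKeys S :=
    PySem.List.sorted_eq_of_perm_of_pairwise_lt d.keys (pvRunKeys S) (fun k => k) hperm hRlt
  -- each group agrees: A's bucket for r is the dedup of the per-rank worlds, in record order
  have hgroup : ∀ r : Int, d.getD r PySem.Set.empty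
      = PySem.Set.ofList ((S.filter (fun p => p.2 == r)).map (·.1)) := by
    intro r
    rw [hd, pvGetD_fold, hempty, hS, pvFilter_sorted, PySem.Set.ofList_eq_foldl]
    rfl
  rw [hA, hkeys, ranks2tpo_alt, pvGroupRuns_eq S hSp]
  exact List.map_congr_left (fun r _ => hgroup r)

-- ===== VERDICT (by name: the statement is the Claim_ definition above) =====
theorem ranks2tpo_spec : Claim_equal_ranks2tpo := by
  intro ranks _
  unfold Spec_ranks2tpo
  exact pvMain ranks
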